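-- pv_equiv track=rewrite | github.com/pyro-ppl/pyro | pyro/ops/_einsum.py | alpha_canonicalize
-- ===== SOURCE A (Python) =====
-- from collections import OrderedDict
--
-- ALPHABET = 'abcdefghijklmnopqrstuvwxyz'
--
-- def alpha_canonicalize(equation):
--     """
--     Attempt to alpha convert to an equation to the letters a-z,
--     in an order-independent canonical way.
--     """
--     rename = OrderedDict()
--     for name in equation:
--         if name in ',->':
--             continue
--         if name not in rename:
--             rename[name] = ALPHABET[len(rename)]
--     return ''.join(rename.get(x, x) for x in equation)
-- ===== SOURCE B (Python) =====
-- ALPHABET = 'abcdefghijklmnopqrstuvwxyz'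
--
-- def alpha_canonicalize(equation):
--     """
--     Attempt to alpha convert to an equation to the letters a-z,
--     in an order-independent canonical way.
--     """
--     def canon(c):
--         if c in ',->':
--             return c
--         rank = len({d for d in equation[:equation.index(c)] if d not in ',->'})
--         return ALPHABET[rank]
--     return ''.join(map(canon, equation))
-- ===== Notes on version B (the rewrite author's own statement) =====
-- stated objective: alternative
-- what changed: B builds no renaming table at all: each output letter is computed independently as ALPHABET[rank], where rank is the number of distinct non-separator characters occurring before the character's first occurrence (a closed-form per-character rank via equation.index and a set comprehension), instead of A's single pass that incrementally grows an OrderedDict and joins lookups.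
import Mathlib
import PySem

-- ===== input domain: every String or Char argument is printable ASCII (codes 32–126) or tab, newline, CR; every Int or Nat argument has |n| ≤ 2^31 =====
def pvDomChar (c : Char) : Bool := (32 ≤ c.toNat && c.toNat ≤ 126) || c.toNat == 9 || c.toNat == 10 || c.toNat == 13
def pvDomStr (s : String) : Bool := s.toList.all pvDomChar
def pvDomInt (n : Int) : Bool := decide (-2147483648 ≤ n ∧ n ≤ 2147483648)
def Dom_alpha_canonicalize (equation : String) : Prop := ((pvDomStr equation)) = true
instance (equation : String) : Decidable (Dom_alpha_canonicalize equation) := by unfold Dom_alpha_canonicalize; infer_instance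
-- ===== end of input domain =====

-- B drops A's incremental renaming table entirely: each output letter is computed independently
-- as ALPHABET[rank], rank = number of distinct non-separator chars before the char's first occurrence.

def pvAlphabet : List Char := "abcdefghijklmnopqrstuvwxyz".toList

-- ===== PORT A =====
-- ALPHABET[len(rename)] raises IndexError when len(rename) ≥ 26; those inputs are excluded by
-- Pre_, so the total form `getD _ '?'` is only reached outside the claim.
def alpha_canonicalize (equation : String) : String :=
  let rename : PySem.Dict Char Char := equation.toList.foldl
    (fun d name =>
      if [',', '-', '>'].contains name then d
      else if d.contains name then d
      else d.insert name (pvAlphabet.getD d.size '?'))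
    PySem.Dict.empty
  String.mk (equation.toList.map (fun x => (rename.get? x).getD x))

-- ===== PORT B =====
-- ''.join(map(canon, equation)): per-char rank computation. equation.index(c) always succeeds
-- (c is drawn from equation), so `(index? …).getD 0` is exact; the set-comprehension length is
-- order-independent (PySem.Set rules), ported as (Set.ofList (filtered slice)).length.
-- ALPHABET[rank] raises IndexError for rank ≥ 26; excluded by Pre_ (getD '?' unreached).
def alpha_canonicalize_alt (equation : String) : String :=
  String.mk (equation.toList.map (fun c =>
    if [',', '-', '>'].contains c then c
    else
      let first : Nat := (PySem.List.index? equation.toList c).getD 0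
      let rank : Nat :=
        (PySem.Set.ofList
          ((PySem.List.slice equation.toList none (some (first : Int))).filter
            (fun d => !([',', '-', '>'].contains d)))).length
      pvAlphabet.getD rank '?'))

-- ===== PRECONDITION & SPEC =====
-- Pre_ excludes equations with more than 26 distinct non-',->' characters, on which the
-- Python A (and B) raise IndexError at ALPHABET[i].
def Pre_alpha_canonicalize (equation : String) : Prop :=
  ((PySem.List.dedup equation.toList).filter
     (fun c => !([',', '-', '>'].contains c))).length ≤ 26
instance (equation : String) : Decidable (Pre_alpha_canonicalize equation) := by
  unfold Pre_alpha_canonicalize; infer_instance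

def pvWitness_alpha_canonicalize : String := "ij,jk->ik"

def Spec_alpha_canonicalize (equation : String) (out : String) : Prop := out = alpha_canonicalize_alt equation
instance (equation : String) (out : String) : Decidable (Spec_alpha_canonicalize equation out) := by unfold Spec_alpha_canonicalize; infer_instance

-- ===== CLAIM (what is proved, stated in full; the proofs are below) =====
def Claim_equal_alpha_canonicalize : Prop := ∀ (equation : String), Dom_alpha_canonicalize equation → Pre_alpha_canonicalize equation → Spec_alpha_canonicalize equation (alpha_canonicalize equation)

-- ===== LEMMAS AND PROOFS =====

-- A's dict, built from an arbitrary already-seen list s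
def pvBuild (s : List Char) : PySem.Dict Char Char :=
  (PySem.List.enumerate s).foldl
    (fun d p => d.insert p.2 (pvAlphabet.getD p.1.toNat '?')) PySem.Dict.empty

theorem pvBuild_append (s : List Char) (c : Char) :
    pvBuild (s ++ [c]) = (pvBuild s).insert c (pvAlphabet.getD s.length '?') := by
  unfold pvBuild
  rw [PySem.List.enumerate_append, List.foldl_append]
  simp [PySem.List.enumerate]

theorem pvBuild_keys (s : List Char) (hs : s.Nodup) : (pvBuild s).keys = s := by
  unfold pvBuild
  rw [PySem.Dict.keys_foldl_insert_key, PySem.List.map_snd_enumerate]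
  simp [PySem.Dict.keys_empty, PySem.Set.update_nil_left,
    PySem.Set.ofList_eq_self_of_nodup s hs]

theorem pvDiscard_filter (t : List Char) (c : Char) (q : Char → Bool) :
    (PySem.Set.discard t c).filter q = t.filter (fun x => q x && !(x == c)) := by
  have hd : PySem.Set.discard t c = t.filter (fun y => !(y == c)) := by
    simp [PySem.Set.discard]
  rw [hd, List.filter_filter]

-- main invariant of A's fold: starting from pvBuild s it yields pvBuild of s extended with the
-- fresh admissible characters of l (first-occurrence order)
theorem pvMain (l : List Char) :
    ∀ (s : List Char), s.Nodup →
      l.foldl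
        (fun d name =>
          if [',', '-', '>'].contains name then d
          else if d.contains name then d
          else d.insert name (pvAlphabet.getD d.size '?')) (pvBuild s)
      = pvBuild (s ++ (PySem.Set.ofList l).filter
          (fun c => !([',', '-', '>'].contains c) && !(s.contains c))) := by
  induction l with
  | nil => intro s _; simp
  | cons c l ih =>
    intro s hs
    rw [List.foldl_cons, PySem.Set.ofList_cons]
    by_cases hsep : [',', '-', '>'].contains c = true
    · rw [if_pos hsep, ih s hs]
      congr 2
      simp only [List.filter_cons, hsep, Bool.not_true, Bool.false_and,
        Bool.false_eq_true, if_false]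
      rw [pvDiscard_filter]
      have hsep' : c = ',' ∨ c = '-' ∨ c = '>' := by simpa using hsep
      apply List.filter_congr
      intro x _
      by_cases hx : x = c
      · rcases hsep' with h|h|h <;> simp [hx, h]
      · simp [hx]
    · rw [if_neg hsep]
      rw [Bool.not_eq_true] at hsep
      by_cases hc : c ∈ s
      · have hcont : (pvBuild s).contains c = true := by
          rw [PySem.Dict.contains_iff_mem_keys, pvBuild_keys s hs]; exact hc
        rw [if_pos hcont, ih s hs]
        congr 2
        have hq : (!([',', '-', '>'].contains c) && !(s.contains c)) = false := by
          simp [hc]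
        simp only [List.filter_cons, hq, Bool.false_eq_true, if_false]
        rw [pvDiscard_filter]
        apply List.filter_congr
        intro x _
        by_cases hx : x = c <;> simp [hx, hc]
      · have hcont : (pvBuild s).contains c = false := by
          rw [← Bool.not_eq_true, PySem.Dict.contains_iff_mem_keys, pvBuild_keys s hs]
          exact hc
        rw [if_neg (by simp [hcont])]
        have hsize : (pvBuild s).size = s.length := by
          have hk := pvBuild_keys s hs
          have : ((pvBuild s).items.map (·.1)).length = s.length := by
            rw [show (pvBuild s).items.map (·.1) = (pvBuild s).keys from rfl, hk]
          simpa [PySem.Dict.size] using this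
        rw [hsize, ← pvBuild_append]
        rw [ih (s ++ [c])
          (by
            rw [List.nodup_append]
            exact ⟨hs, List.nodup_singleton c,
              by simp; intro a ha e; exact hc (e ▸ ha)⟩)]
        congr 1
        have hsep' : ¬c = ',' ∧ ¬c = '-' ∧ ¬c = '>' := by simpa using hsep
        have hq : (!([',', '-', '>'].contains c) && !(s.contains c)) = true := by
          simp [hsep'.1, hsep'.2.1, hsep'.2.2, hc]
        simp only [List.filter_cons, hq, if_true, List.append_assoc, List.cons_append,
          List.nil_append]
        congr 2
        rw [pvDiscard_filter]
        apply List.filter_congr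
        intro x _
        by_cases hx : x = c <;> simp [hx]

-- ofList commutes with filter
theorem pvFilter_discard_comm (S : List Char) (c : Char) (q : Char → Bool) :
    (PySem.Set.discard S c).filter q = PySem.Set.discard (S.filter q) c := by
  have h2 : PySem.Set.discard (S.filter q) c = (S.filter q).filter (fun y => !(y == c)) := by
    simp [PySem.Set.discard]
  rw [pvDiscard_filter, h2, List.filter_filter]
  apply List.filter_congr
  intro x _
  rw [Bool.and_comm]

theorem pvOfList_filter (q : Char → Bool) (l : List Char) :
    (PySem.Set.ofList l).filter q = PySem.Set.ofList (l.filter q) := by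
  induction l with
  | nil => simp [PySem.Set.ofList_nil]
  | cons c l ih =>
    rw [PySem.Set.ofList_cons]
    by_cases hq : q c = true
    · rw [List.filter_cons_of_pos hq, pvFilter_discard_comm, ih,
        List.filter_cons_of_pos hq, PySem.Set.ofList_cons]
    · have hq' : q c = false := by simpa using hq
      rw [List.filter_cons_of_neg (by simp [hq']), pvFilter_discard_comm, ih,
        List.filter_cons_of_neg (by simp [hq'])]
      have hnc : c ∉ PySem.Set.ofList (l.filter q) := by
        intro h
        have := List.of_mem_filter ((PySem.Set.mem_ofList _ _).mp h)
        rw [hq'] at this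
        exact Bool.false_ne_true this
      have hdd : PySem.Set.discard (PySem.Set.ofList (l.filter q)) c
          = (PySem.Set.ofList (l.filter q)).filter (fun y => !(y == c)) := by
        simp [PySem.Set.discard]
      rw [hdd]
      apply List.filter_eq_self.mpr
      intro x hx
      simp only [Bool.not_eq_true', beq_eq_false_iff_ne]
      intro he
      exact hnc (he ▸ hx)

-- lookup in the built dict = position in the seen list
theorem pvBuild_get? (s : List Char) (hs : s.Nodup) (c : Char) (hc : c ∈ s) :
    (pvBuild s).get? c
      = some (pvAlphabet.getD ((PySem.List.index? s c).getD 0) '?') := by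
  induction s using List.reverseRecOn with
  | nil => cases hc
  | append_singleton t a ih =>
    rw [pvBuild_append]
    have hnd := (List.nodup_append.mp hs)
    by_cases hca : c = a
    · subst hca
      have hns : c ∉ t := by
        intro h
        exact hnd.2.2 c h c (by simp) rfl
      rw [PySem.Dict.get?_insert_self, PySem.List.index?_append_singleton_self t c hns]
      rfl
    · have hct : c ∈ t := by
        rcases List.mem_append.mp hc with h|h
        · exact h
        · exact absurd (by simpa using h) hca
      rw [PySem.Dict.get?_insert_of_ne _ _ hca, ih hnd.1 hct,
        PySem.List.index?_append_of_mem _ hct]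

-- position of c's first occurrence in the deduped filtered list = number of distinct
-- admissible chars strictly before c's first occurrence in l
theorem pvRank (q : Char → Bool) (l : List Char) (c : Char) (k : Nat)
    (hq : q c = true) (hk : PySem.List.index? l c = some k) :
    PySem.List.index? ((PySem.Set.ofList l).filter q) c
      = some ((PySem.Set.ofList ((l.take k).filter q)).length) := by
  obtain ⟨pre, suf, hl, hlen, hnp⟩ := (PySem.List.index?_eq_some_iff _ _ _).mp hk
  subst hl
  have htake : (pre ++ c :: suf).take k = pre := by
    rw [← hlen, List.take_left]
  rw [htake, pvOfList_filter, List.filter_append, List.filter_cons, hq, if_pos rfl]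
  rw [PySem.Set.ofList_append, PySem.Set.update_cons]
  have hnp' : c ∉ PySem.Set.ofList (pre.filter q) := by
    intro h
    exact hnp (List.mem_of_mem_filter ((PySem.Set.mem_ofList _ _).mp h))
  rw [PySem.Set.add_of_not_mem hnp', PySem.Set.update_eq_append_filter]
  rw [PySem.List.index?_append_of_mem _
    (by simp : c ∈ PySem.Set.ofList (pre.filter q) ++ [c]),
    PySem.List.index?_append_singleton_self (PySem.Set.ofList (pre.filter q)) c hnp']

-- ===== VERDICT (by name: the statement is the Claim_ definition above) =====
theorem alpha_canonicalize_spec : Claim_equal_alpha_canonicalize := by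
  intro equation _ _
  unfold Spec_alpha_canonicalize alpha_canonicalize alpha_canonicalize_alt
  dsimp only
  have h := pvMain equation.toList [] (by simp)
  rw [show pvBuild ([] : List Char) = PySem.Dict.empty from rfl] at h
  simp only [List.nil_append, List.contains_nil, Bool.not_false, Bool.and_true] at h
  rw [h]
  congr 1
  apply List.map_congr_left
  intro c hc
  have hSnd : ((PySem.Set.ofList equation.toList).filter
      (fun d => !([',', '-', '>'].contains d))).Nodup :=
    (PySem.Set.nodup_ofList _).filter _
  by_cases hsep : [',', '-', '>'].contains c = true
  · rw [if_pos hsep]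
    have hnone : (pvBuild ((PySem.Set.ofList equation.toList).filter
        (fun d => !([',', '-', '>'].contains d)))).get? c = none := by
      rw [PySem.Dict.get?_eq_none_iff_contains, ← Bool.not_eq_true,
        PySem.Dict.contains_iff_mem_keys, pvBuild_keys _ hSnd]
      intro hmem
      have := List.of_mem_filter hmem
      rw [hsep] at this
      simp at this
    rw [hnone, Option.getD_none]
  · rw [if_neg hsep]
    rw [Bool.not_eq_true] at hsep
    have hqc : (!([',', '-', '>'].contains c)) = true := by rw [hsep]; rfl
    obtain ⟨k, hk⟩ := Option.isSome_iff_exists.mp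
      ((PySem.List.index?_isSome_iff _ _).mpr hc)
    have hcS : c ∈ (PySem.Set.ofList equation.toList).filter
        (fun d => !([',', '-', '>'].contains d)) :=
      List.mem_filter.mpr ⟨(PySem.Set.mem_ofList _ _).mpr hc, hqc⟩
    rw [pvBuild_get? _ hSnd c hcS, Option.getD_some,
      pvRank (fun d => !([',', '-', '>'].contains d)) equation.toList c k hqc hk, hk]
    simp [PySem.List.slice_to_natCast]
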